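-- pv_equiv track=rewrite | github.com/Kitinnits/CIS360-Project | app.py | _detect_entity
-- ===== SOURCE A (Python) =====
-- def _detect_entity(normalized: str, tokens: list[str]) -> str:
-- 		token_set: set[str] = set(tokens)
-- 		for token in list(token_set):
-- 			if token.endswith("ies") and len(token) > 4:
-- 				token_set.add(f"{token[:-3]}y")
-- 			if token.endswith("es") and len(token) > 4:
-- 				token_set.add(token[:-2])
-- 			if token.endswith("s") and len(token) > 3:
-- 				token_set.add(token[:-1])
--
-- 		paper_cues = {"paper", "article", "publication", "author"}
-- 		method_cues = {"method", "fusion", "approach", "technique", "model"}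
-- 		dataset_cues = {"dataset", "data", "sensor", "collection", "source"}
--
-- 		scores = {
-- 			"paper": sum(1 for cue in paper_cues if cue in token_set),
-- 			"method": sum(1 for cue in method_cues if cue in token_set),
-- 			"dataset": sum(1 for cue in dataset_cues if cue in token_set),
-- 		}
--
-- 		if scores["paper"] == 0 and scores["method"] == 0 and scores["dataset"] == 0:
-- 			if "field of study" in normalized:
-- 				return "paper"
-- 			return "all"
--
-- 		best_score = max(scores.values())
-- 		winners = [entity for entity, score in scores.items() if score == best_score and score > 0]
-- 		if len(winners) != 1:
-- 			return "all"
-- 		return winners[0]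
-- ===== SOURCE B (Python) =====
-- _PAPER_CUES = ("paper", "article", "publication", "author")
-- _METHOD_CUES = ("method", "fusion", "approach", "technique", "model")
-- _DATASET_CUES = ("dataset", "data", "sensor", "collection", "source")
--
--
-- def _detect_entity(normalized: str, tokens: list[str]) -> str:
--     # Instead of expanding tokens by stemming rules, check each cue backwards:
--     # no cue ends in "y", so a cue can only be produced by the "es"/"s" rules,
--     # i.e. it is present iff the cue itself or cue+"s" or cue+"es" is a token.
--     seen = set(tokens)
--
--     def cued(cue: str) -> bool:
--         return cue in seen or cue + "s" in seen or cue + "es" in seen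
--
--     p = sum(map(cued, _PAPER_CUES))
--     m = sum(map(cued, _METHOD_CUES))
--     d = sum(map(cued, _DATASET_CUES))
--
--     if p == 0 and m == 0 and d == 0:
--         return "paper" if "field of study" in normalized else "all"
--
--     best = max(p, m, d)
--     if (p == best) + (m == best) + (d == best) != 1:
--         return "all"
--     return "paper" if p == best else ("method" if m == best else "dataset")
-- ===== Notes on version B (the rewrite author's own statement) =====
-- stated objective: alternative
-- what changed: B drops A's stemming-expansion of the token set entirely: since no cue word ends in 'y', a cue can only be matched directly or produced by the 's'/'es' stripping rules, so B checks backwards per cue whether cue, cue+'s' or cue+'es' occurs among the tokens, and replaces A's score dict and winners-filter by three plain counters with an arithmetic tie check.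
import Mathlib
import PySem

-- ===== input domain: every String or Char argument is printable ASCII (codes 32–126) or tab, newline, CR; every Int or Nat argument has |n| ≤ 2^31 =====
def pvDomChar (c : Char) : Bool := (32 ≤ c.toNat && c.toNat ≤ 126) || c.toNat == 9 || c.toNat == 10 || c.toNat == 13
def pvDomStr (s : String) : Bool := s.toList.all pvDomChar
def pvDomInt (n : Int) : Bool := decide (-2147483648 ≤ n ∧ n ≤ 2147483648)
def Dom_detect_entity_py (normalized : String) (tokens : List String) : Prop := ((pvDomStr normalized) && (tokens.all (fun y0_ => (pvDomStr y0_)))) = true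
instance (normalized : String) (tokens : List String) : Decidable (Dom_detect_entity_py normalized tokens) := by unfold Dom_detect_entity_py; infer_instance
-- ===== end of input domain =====

-- B replaces A's stemming-expansion of the token set by a backward check per cue (no cue
-- ends in "y", so a cue is present iff cue, cue+"s" or cue+"es" is a token) and the score
-- dicts by three plain counters with arithmetic tie detection (objective: alternative).

-- ===== PORT A =====
-- one iteration of A's expansion loop over the snapshot of the initial set
def pvStep (ts : PySem.Set String) (token : String) : PySem.Set String :=
  let ts := if PySem.Str.endswith token "ies" && decide (4 < PySem.Str.len token)
    then PySem.Set.add ts (PySem.Str.slice token none (some (-3)) ++ "y") else ts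
  let ts := if PySem.Str.endswith token "es" && decide (4 < PySem.Str.len token)
    then PySem.Set.add ts (PySem.Str.slice token none (some (-2))) else ts
  let ts := if PySem.Str.endswith token "s" && decide (3 < PySem.Str.len token)
    then PySem.Set.add ts (PySem.Str.slice token none (some (-1))) else ts
  ts

-- token_set = set(tokens); for token in list(token_set): … (adds are invisible to the snapshot)
def pvStemExpand (tokens : List String) : PySem.Set String :=
  let base := PySem.Set.ofList tokens
  base.foldl pvStep base

def pvPaperCues : List String := ["paper", "article", "publication", "author"]
def pvMethodCues : List String := ["method", "fusion", "approach", "technique", "model"]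
def pvDatasetCues : List String := ["dataset", "data", "sensor", "collection", "source"]

-- sum(1 for cue in cues if cue in token_set)
def pvCueScore (cues : List String) (token_set : PySem.Set String) : Int :=
  cues.foldl (fun acc cue => acc + if PySem.Set.contains token_set cue then 1 else 0) 0

def detect_entity_py (normalized : String) (tokens : List String) : String :=
  let token_set := pvStemExpand tokens
  let scores : PySem.Dict String Int := PySem.Dict.ofList
    [("paper", pvCueScore pvPaperCues token_set),
     ("method", pvCueScore pvMethodCues token_set),
     ("dataset", pvCueScore pvDatasetCues token_set)]
  if scores.getD "paper" 0 = 0 ∧ scores.getD "method" 0 = 0 ∧ scores.getD "dataset" 0 = 0 then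
    if PySem.Str.isIn "field of study" normalized then "paper" else "all"
  else
    let best_score := (PySem.List.max? scores.values (fun v => v)).getD 0
    let winners := (scores.items.filter (fun es => es.2 == best_score && decide (0 < es.2))).map (·.1)
    if winners.length ≠ 1 then "all" else winners.headD "all"

-- ===== PORT B =====
-- cue in seen or cue + "s" in seen or cue + "es" in seen
def pvCued (seen : PySem.Set String) (cue : String) : Bool :=
  PySem.Set.contains seen cue || PySem.Set.contains seen (cue ++ "s") ||
    PySem.Set.contains seen (cue ++ "es")

-- sum(map(cued, cues))
def pvCuedSum (seen : PySem.Set String) (cues : List String) : Int :=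
  ((cues.map (pvCued seen)).map (fun b => if b then (1 : Int) else 0)).sum

def detect_entity_py_alt (normalized : String) (tokens : List String) : String :=
  let seen := PySem.Set.ofList tokens
  let p := pvCuedSum seen pvPaperCues
  let m := pvCuedSum seen pvMethodCues
  let d := pvCuedSum seen pvDatasetCues
  if p = 0 ∧ m = 0 ∧ d = 0 then
    if PySem.Str.isIn "field of study" normalized then "paper" else "all"
  else
    let best := max p (max m d)
    if (if p = best then (1 : Int) else 0) + (if m = best then 1 else 0) +
        (if d = best then 1 else 0) ≠ 1 then "all"
    else if p = best then "paper" else if m = best then "method" else "dataset"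

-- ===== PRECONDITION & SPEC =====
def Spec_detect_entity_py (normalized : String) (tokens : List String) (out : String) : Prop := out = detect_entity_py_alt normalized tokens
instance (normalized : String) (tokens : List String) (out : String) : Decidable (Spec_detect_entity_py normalized tokens out) := by unfold Spec_detect_entity_py; infer_instance

-- ===== CLAIM =====
def Claim_equal_detect_entity_py : Prop := ∀ (normalized : String) (tokens : List String), Dom_detect_entity_py normalized tokens → Spec_detect_entity_py normalized tokens (detect_entity_py normalized tokens)

-- ===== LEMMAS AND PROOFS =====

-- x is one of the strings A's stemming rules derive from token t
def pvDerives (t x : String) : Prop :=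
  ((PySem.Str.endswith t "ies" && decide (4 < PySem.Str.len t)) = true ∧
    x = PySem.Str.slice t none (some (-3)) ++ "y")
  ∨ ((PySem.Str.endswith t "es" && decide (4 < PySem.Str.len t)) = true ∧
    x = PySem.Str.slice t none (some (-2)))
  ∨ ((PySem.Str.endswith t "s" && decide (3 < PySem.Str.len t)) = true ∧
    x = PySem.Str.slice t none (some (-1)))

theorem mem_cond_add (s : PySem.Set String) (c : Bool) (v x : String) :
    x ∈ (if c = true then PySem.Set.add s v else s) ↔ x ∈ s ∨ (c = true ∧ x = v) := by
  cases c <;> simp [PySem.Set.mem_add]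

theorem mem_pvStep (s : PySem.Set String) (t x : String) :
    x ∈ pvStep s t ↔ x ∈ s ∨ pvDerives t x := by
  unfold pvStep pvDerives
  dsimp only
  rw [mem_cond_add, mem_cond_add, mem_cond_add]
  simp only [or_assoc]

theorem mem_foldl_pvStep (l : List String) (s : PySem.Set String) (x : String) :
    x ∈ l.foldl pvStep s ↔ x ∈ s ∨ ∃ t ∈ l, pvDerives t x := by
  induction l generalizing s with
  | nil => simp
  | cons a l ih => rw [List.foldl_cons, ih, mem_pvStep]; simp; tauto

theorem mem_pvStemExpand (tokens : List String) (x : String) :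
    x ∈ pvStemExpand tokens ↔ x ∈ tokens ∨ ∃ t ∈ tokens, pvDerives t x := by
  unfold pvStemExpand
  rw [mem_foldl_pvStep]
  simp [PySem.Set.mem_ofList]

-- for a cue not ending in "y" and of length ≥ 3, only the "s"/"es" rules can produce it
theorem pvDerives_cue_iff (cue t : String) (hy : ¬ ['y'] <:+ cue.toList)
    (hlen : 3 ≤ cue.toList.length) :
    pvDerives t cue ↔ t = cue ++ "s" ∨ t = cue ++ "es" := by
  have hlen' : 3 ≤ cue.length := by rw [← String.length_toList]; exact hlen
  unfold pvDerives
  simp only [Bool.and_eq_true, decide_eq_true_iff, PySem.Str.endswith_eq]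
  constructor
  · rintro (⟨⟨-, -⟩, hx⟩ | ⟨⟨hend, -⟩, hx⟩ | ⟨⟨hend, -⟩, hx⟩)
    · exfalso
      apply hy
      rw [hx, String.toList_append]
      exact List.suffix_append _ _
    · right
      rw [PySem.Chars.endswith_iff] at hend
      obtain ⟨u, hu⟩ := hend
      have hcue : cue.toList = u := by
        have h2 : cue.toList = t.toList.take (t.toList.length - 2) := by
          rw [hx]; simp [PySem.List.slice_to_neg_ofNat _ 2 (by omega)]
        rw [h2, ← hu]
        have : (u ++ ("es" : String).toList).length - 2 = u.length := by
          simp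
        rw [this]
        exact List.take_left
      apply String.toList_inj.mp
      rw [String.toList_append, ← hu, hcue]
    · left
      rw [PySem.Chars.endswith_iff] at hend
      obtain ⟨u, hu⟩ := hend
      have hcue : cue.toList = u := by
        have h2 : cue.toList = t.toList.dropLast := by
          rw [hx]; simp [PySem.List.slice_to_neg_one]
        rw [h2, ← hu]
        exact List.dropLast_concat
      apply String.toList_inj.mp
      rw [String.toList_append, ← hu, hcue]
  · rintro (rfl | rfl)
    · refine Or.inr (Or.inr ⟨⟨?_, ?_⟩, ?_⟩)
      · rw [PySem.Chars.endswith_iff, String.toList_append]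
        exact List.suffix_append _ _
      · simp [String.toList_append, String.length_toList]; omega
      · apply String.toList_inj.mp
        simp [PySem.List.slice_to_neg_one, String.toList_append]
    · refine Or.inr (Or.inl ⟨⟨?_, ?_⟩, ?_⟩)
      · rw [PySem.Chars.endswith_iff, String.toList_append]
        exact List.suffix_append _ _
      · simp [String.toList_append, String.length_toList]; omega
      · apply String.toList_inj.mp
        symm
        simp only [PySem.Str.toList_slice, PySem.Chars.slice_eq_listSlice]
        rw [PySem.List.slice_to_neg_ofNat _ 2 (by omega), String.toList_append]
        have h5 : (cue.toList ++ ("es" : String).toList).length - 2 = cue.toList.length := by simp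
        rw [h5]
        exact List.take_left

theorem pvContains_expand (tokens : List String) (cue : String)
    (hy : ¬ ['y'] <:+ cue.toList) (hlen : 3 ≤ cue.toList.length) :
    PySem.Set.contains (pvStemExpand tokens) cue = pvCued (PySem.Set.ofList tokens) cue := by
  rw [Bool.eq_iff_iff]
  unfold pvCued
  rw [PySem.Set.contains_iff, mem_pvStemExpand]
  simp only [Bool.or_eq_true, PySem.Set.contains_iff, PySem.Set.mem_ofList]
  constructor
  · rintro (h | ⟨t, ht, hd⟩)
    · tauto
    · rcases (pvDerives_cue_iff cue t hy hlen).mp hd with rfl | rfl <;> tauto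
  · rintro ((h | h) | h)
    · exact Or.inl h
    · exact Or.inr ⟨_, h, (pvDerives_cue_iff cue _ hy hlen).mpr (Or.inl rfl)⟩
    · exact Or.inr ⟨_, h, (pvDerives_cue_iff cue _ hy hlen).mpr (Or.inr rfl)⟩

theorem pvCueScore_eq_cuedSum (tokens : List String) (cues : List String)
    (h : ∀ c ∈ cues, ¬ ['y'] <:+ c.toList ∧ 3 ≤ c.toList.length) :
    pvCueScore cues (pvStemExpand tokens) = pvCuedSum (PySem.Set.ofList tokens) cues := by
  unfold pvCueScore pvCuedSum
  have key : ∀ (cs : List String), (∀ c ∈ cs, ¬ ['y'] <:+ c.toList ∧ 3 ≤ c.toList.length) →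
      ∀ (a : Int),
      cs.foldl (fun acc cue => acc + if PySem.Set.contains (pvStemExpand tokens) cue then 1 else 0) a
        = a + ((cs.map (pvCued (PySem.Set.ofList tokens))).map (fun b => if b then (1 : Int) else 0)).sum := by
    intro cs
    induction cs with
    | nil => intro _ a; simp
    | cons c cs ih =>
      intro hc a
      simp only [List.foldl_cons, List.map_cons, List.sum_cons]
      rw [ih (fun x hx => hc x (List.mem_cons_of_mem _ hx)),
          pvContains_expand tokens c (hc c List.mem_cons_self).1 (hc c List.mem_cons_self).2]
      ring
  rw [key cues h 0]
  ring

theorem pvCuedSum_nonneg (seen : PySem.Set String) (cues : List String) :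
    0 ≤ pvCuedSum seen cues := by
  unfold pvCuedSum
  apply List.sum_nonneg
  intro x hx
  simp only [List.mem_map] at hx
  obtain ⟨b, -, rfl⟩ := hx
  split_ifs <;> omega

theorem pvMax_triple (p m d : Int) :
    PySem.List.max? [p, m, d] (fun v => v) = some (max p (max m d)) := by
  unfold PySem.List.max?
  simp only [List.foldl_cons, List.foldl_nil]
  by_cases h1 : p < m <;> by_cases h2 : m < d <;> by_cases h3 : p < d <;>
    simp [h1, h2, h3] <;> omega

-- the decision tails agree once the three scores agree (and are nonnegative)
theorem pvDecision_eq (normalized : String) (p m d : Int)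
    (hp : 0 ≤ p) (hm : 0 ≤ m) (hd : 0 ≤ d) :
    (if p = 0 ∧ m = 0 ∧ d = 0 then
      if PySem.Str.isIn "field of study" normalized then "paper" else "all"
    else
      if ((((PySem.Dict.ofList
          [("paper", p), ("method", m), ("dataset", d)]).items).filter
          (fun es => es.2 == (PySem.List.max? ((PySem.Dict.ofList
            [("paper", p), ("method", m), ("dataset", d)]).values) (fun v => v)).getD 0 &&
            decide (0 < es.2))).map (·.1)).length ≠ 1 then "all"
      else (((((PySem.Dict.ofList
          [("paper", p), ("method", m), ("dataset", d)]).items).filter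
          (fun es => es.2 == (PySem.List.max? ((PySem.Dict.ofList
            [("paper", p), ("method", m), ("dataset", d)]).values) (fun v => v)).getD 0 &&
            decide (0 < es.2))).map (·.1))).headD "all") =
    (if p = 0 ∧ m = 0 ∧ d = 0 then
      if PySem.Str.isIn "field of study" normalized then "paper" else "all"
    else
      if (if p = max p (max m d) then (1 : Int) else 0) +
          (if m = max p (max m d) then 1 else 0) +
          (if d = max p (max m d) then 1 else 0) ≠ 1 then "all"
      else if p = max p (max m d) then "paper"
      else if m = max p (max m d) then "method" else "dataset") := by
  by_cases h0 : p = 0 ∧ m = 0 ∧ d = 0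
  · simp [h0]
  · simp only [h0, if_false]
    have hvals : (PySem.Dict.ofList
        [("paper", p), ("method", m), ("dataset", d)]).values = [p, m, d] := rfl
    have hitems : (PySem.Dict.ofList
        [("paper", p), ("method", m), ("dataset", d)]).items =
        [("paper", p), ("method", m), ("dataset", d)] := rfl
    rw [hvals, hitems, pvMax_triple]
    obtain ⟨b, hb⟩ : ∃ b, max p (max m d) = b := ⟨_, rfl⟩
    rw [hb]
    simp only [Option.getD_some]
    have hbpos : 0 < b := by omega
    by_cases hP : p = b <;> by_cases hM : m = b <;> by_cases hD : d = b
    · norm_num [List.filter, hP, hM, hD, hbpos]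
      try omega
    · norm_num [List.filter, hP, hM, hD, hbpos, beq_false_of_ne hD]
      try omega
    · norm_num [List.filter, hP, hM, hD, hbpos, beq_false_of_ne hM]
      try omega
    · norm_num [List.filter, hP, hM, hD, hbpos, beq_false_of_ne hM, beq_false_of_ne hD]
      try omega
    · norm_num [List.filter, hP, hM, hD, hbpos, beq_false_of_ne hP]
      try omega
    · norm_num [List.filter, hP, hM, hD, hbpos, beq_false_of_ne hP, beq_false_of_ne hD]
      try omega
    · norm_num [List.filter, hP, hM, hD, hbpos, beq_false_of_ne hP, beq_false_of_ne hM]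
      try omega
    · norm_num [List.filter, hP, hM, hD, hbpos, beq_false_of_ne hP, beq_false_of_ne hM, beq_false_of_ne hD]
      try omega

-- ===== VERDICT =====
theorem detect_entity_py_spec : Claim_equal_detect_entity_py := by
  intro normalized tokens _
  unfold Spec_detect_entity_py
  dsimp only [detect_entity_py, detect_entity_py_alt]
  rw [pvCueScore_eq_cuedSum tokens pvPaperCues (by decide),
      pvCueScore_eq_cuedSum tokens pvMethodCues (by decide),
      pvCueScore_eq_cuedSum tokens pvDatasetCues (by decide)]
  have h := pvDecision_eq normalized
    (pvCuedSum (PySem.Set.ofList tokens) pvPaperCues)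
    (pvCuedSum (PySem.Set.ofList tokens) pvMethodCues)
    (pvCuedSum (PySem.Set.ofList tokens) pvDatasetCues)
    (pvCuedSum_nonneg _ _) (pvCuedSum_nonneg _ _) (pvCuedSum_nonneg _ _)
  -- getD on the literal three-entry dict evaluates to the stored scores
  exact h
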